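-- pv_equiv track=rewrite | github.com/bvnyamin/tarea_ada_2025-2 | torta_recursiva_arreglo.py | max_satisfaccion_arreglo
-- ===== SOURCE A (Python) =====
-- from typing import List, Tuple
--
-- def suma_segmento_pref(prefijos: List[int], i: int, j: int) -> int:
--     if i > j: return 0
--     return prefijos[j + 1] - prefijos[i]
--
-- def dp_segmento_arr(i: int, j: int, memo_arr: List[List[int]], torta: List[int], prefijos: List[int]) -> int:
--
--
--     if memo_arr[i][j] > -10**18:
--         return memo_arr[i][j]
--
--     # 2. Caso Base
--     if i == j:
--         return torta[i]
--
--     # 3. Recurrencia Minimax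
--     # Opción A: Comer izquierda
--     total_restante_A = suma_segmento_pref(prefijos, i + 1, j)
--     oponente_A = dp_segmento_arr(i + 1, j, memo_arr, torta, prefijos)
--     ganancia_A = torta[i] + (total_restante_A - oponente_A)
--
--     # Opción B: Comer derecha
--     total_restante_B = suma_segmento_pref(prefijos, i, j - 1)
--     oponente_B = dp_segmento_arr(i, j - 1, memo_arr, torta, prefijos)
--     ganancia_B = torta[j] + (total_restante_B - oponente_B)
--
--     mejor_opcion = max(ganancia_A, ganancia_B)
--
--     # 4. Guardar en Matriz
--     memo_arr[i][j] = mejor_opcion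
--     return mejor_opcion
--
-- def max_satisfaccion_arreglo(torta: List[int]) -> Tuple[int, int]:
--     """
--     Implementación usando Minimax y Memoización con ARREGLOS (Matriz).
--     """
--     total_porciones = len(torta)
--
--     if total_porciones % 2 != 0:
--         raise ValueError(f"Error: El arreglo debe ser par")
--
--     mitad_porciones = total_porciones // 2
--     torta_extendida = torta * 2
--
--     # Sumas prefijas
--     prefijos = [0] * (len(torta_extendida) + 1)
--     for k in range(len(torta_extendida)):
--         prefijos[k+1] = prefijos[k] + torta_extendida[k]
--
--     # Inicializar Matriz de Memoización
--     largo_memo = 2 * total_porciones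
--     valor_inicial_memo = -10**19
--     memo_arr = [[valor_inicial_memo] * largo_memo for _ in range(largo_memo)]
--
--     mayor_satisfaccion = valor_inicial_memo
--     mejor_inicio = -1
--
--     for i in range(total_porciones):
--         # Profesor come semicírculo inicial
--         ganancia_inicial_prof = suma_segmento_pref(prefijos, i, i + mitad_porciones - 1)
--
--         # Resto del juego
--         ini_segmento_resto = i + mitad_porciones
--         fin_resto = i + total_porciones - 1
--
--         total_resto = suma_segmento_pref(prefijos, ini_segmento_resto, fin_resto)
--
--         val_hermana = dp_segmento_arr(ini_segmento_resto, fin_resto, memo_arr, torta_extendida, prefijos)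
--
--         val_profesor_resto = total_resto - val_hermana
--         ganancia_prof_total = ganancia_inicial_prof + val_profesor_resto
--
--         if ganancia_prof_total > mayor_satisfaccion:
--             mayor_satisfaccion = ganancia_prof_total
--             mejor_inicio = i
--
--     return mayor_satisfaccion, mejor_inicio % total_porciones
-- ===== SOURCE B (Python) =====
-- from typing import List, Tuple
--
-- def max_satisfaccion_arreglo(torta: List[int]) -> Tuple[int, int]:
--     """Bottom-up interval DP (no recursion, no memo sentinel checks)."""
--     n = len(torta)
--     if n % 2 != 0:
--         raise ValueError("Error: El arreglo debe ser par")
--     mitad = n // 2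
--     ext = torta * 2
--     # prefix sums of the doubled array
--     pref = [0]
--     s = 0
--     for x in ext:
--         s += x
--         pref.append(s)
--     m = 2 * n
--     # dp[i][j] = best score the player to move can get on ext[i..j]
--     dp = [[0] * m for _ in range(m)]
--     for i in range(m):
--         dp[i][i] = ext[i]
--     for largo in range(2, m + 1):
--         for i in range(0, m - largo + 1):
--             j = i + largo - 1
--             a = ext[i] + (pref[j + 1] - pref[i + 1]) - dp[i + 1][j]
--             b = ext[j] + (pref[j] - pref[i]) - dp[i][j - 1]
--             dp[i][j] = a if a > b else b
--     mayor = -10**19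
--     mejor = -1
--     for i in range(n):
--         ganancia = (pref[i + mitad] - pref[i]) + (pref[i + n] - pref[i + mitad]) - dp[i + mitad][i + n - 1]
--         if ganancia > mayor:
--             mayor = ganancia
--             mejor = i
--     return mayor, mejor % n
-- ===== Notes on version B (the rewrite author's own statement) =====
-- stated objective: alternative
-- what changed: Replaces A's top-down memoized minimax recursion (recursive helper with a sentinel-checked memo matrix) by an iterative bottom-up interval DP that fills the table by increasing interval length, with a running-sum prefix list instead of A's preallocate-and-assign loop.
import Mathlib
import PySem

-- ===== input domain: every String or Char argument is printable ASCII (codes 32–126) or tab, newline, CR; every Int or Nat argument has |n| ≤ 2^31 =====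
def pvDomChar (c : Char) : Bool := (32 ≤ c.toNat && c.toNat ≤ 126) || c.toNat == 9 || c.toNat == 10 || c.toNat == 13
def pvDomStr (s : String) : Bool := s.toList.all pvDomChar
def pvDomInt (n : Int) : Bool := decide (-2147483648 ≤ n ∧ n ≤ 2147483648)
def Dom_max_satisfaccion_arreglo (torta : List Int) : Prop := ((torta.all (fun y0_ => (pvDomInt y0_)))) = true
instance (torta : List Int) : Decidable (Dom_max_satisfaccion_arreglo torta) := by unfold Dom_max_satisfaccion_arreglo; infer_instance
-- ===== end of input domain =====

-- B replaces A's memoized minimax recursion by a bottom-up interval DP filled by increasing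
-- interval length (objective: alternative decomposition, same asymptotic cost).

-- ===== PORT A =====
-- suma_segmento_pref; all indices are nonnegative at every call site, so .toNat is exact there
def sumaSegA (prefijos : List Int) (i j : Int) : Int :=
  if i > j then 0
  else prefijos.getD (j + 1).toNat 0 - prefijos.getD i.toNat 0

-- memo_arr[i][j]; indices are nonnegative and in range in the Python, defaults arbitrary (the init sentinel)
def mgetA (m : List (List Int)) (i j : Int) : Int :=
  (m.getD i.toNat []).getD j.toNat (-10^19)

-- memo_arr[i][j] = v
def msetA (m : List (List Int)) (i j : Int) (v : Int) : List (List Int) :=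
  m.set i.toNat ((m.getD i.toNat []).set j.toNat v)

-- dp_segmento_arr; fuel only makes the recursion total (one unit per unit of j - i, never exhausted below)
def dpSegA (fuel : Nat) (i j : Int) (memo : List (List Int)) (torta prefijos : List Int) :
    Int × List (List Int) :=
  match fuel with
  | 0 => (0, memo)
  | fuel + 1 =>
    if mgetA memo i j > -10^18 then (mgetA memo i j, memo)
    else if i = j then (torta.getD i.toNat 0, memo)
    else
      let totalA := sumaSegA prefijos (i + 1) j
      let r1 := dpSegA fuel (i + 1) j memo torta prefijos
      let gA := torta.getD i.toNat 0 + (totalA - r1.1)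
      let totalB := sumaSegA prefijos i (j - 1)
      let r2 := dpSegA fuel i (j - 1) r1.2 torta prefijos
      let gB := torta.getD j.toNat 0 + (totalB - r2.1)
      let mejor := max gA gB
      (mejor, msetA r2.2 i j mejor)

def max_satisfaccion_arreglo (torta : List Int) : Int × Int :=
  let total : Int := torta.length
  -- Python raises ValueError on odd length and ZeroDivisionError ('% 0') on []; Pre_ excludes both
  let mitad : Int := PySem.Int.floordiv total 2
  let ext := torta ++ torta
  let prefijos := (List.range ext.length).foldl
      (fun p k => p.set (k + 1) (p.getD k 0 + ext.getD k 0))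
      (List.replicate (ext.length + 1) 0)
  let memo0 := List.replicate (2 * torta.length) (List.replicate (2 * torta.length) (-10^19 : Int))
  let r := (PySem.List.pyRange 0 total 1).foldl
      (fun (st : Int × Int × List (List Int)) i =>
        let gInicial := sumaSegA prefijos i (i + mitad - 1)
        let ini := i + mitad
        let fin := i + total - 1
        let totalResto := sumaSegA prefijos ini fin
        let dq := dpSegA (2 * torta.length + 1) ini fin st.2.2 ext prefijos
        let g := gInicial + (totalResto - dq.1)
        if g > st.1 then (g, i, dq.2) else (st.1, st.2.1, dq.2))
      (-10^19, -1, memo0)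
  (r.1, PySem.Int.mod r.2.1 total)

-- ===== PORT B =====
-- dp[i][j]; indices are nonnegative and in range in the Python, defaults arbitrary
def tgetB (d : List (List Int)) (i j : Nat) : Int := (d.getD i []).getD j 0

def tsetB (d : List (List Int)) (i j : Nat) (v : Int) : List (List Int) :=
  d.set i ((d.getD i []).set j v)

def max_satisfaccion_arreglo_alt (torta : List Int) : Int × Int :=
  let nn := torta.length
  -- Python raises ValueError on odd length and ZeroDivisionError on []; Pre_ excludes both
  let half := nn / 2
  let ext := torta ++ torta
  let pref := (ext.foldl (fun (st : Int × List Int) x => (st.1 + x, st.2 ++ [st.1 + x])) (0, [0])).2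
  let m := 2 * nn
  let dp0 := List.replicate m (List.replicate m (0 : Int))
  let dpDiag := (List.range m).foldl (fun d i => tsetB d i i (ext.getD i 0)) dp0
  let dpFull := (List.range' 2 (m - 1)).foldl (fun d largo =>
      (List.range (m - largo + 1)).foldl (fun d i =>
        let j := i + largo - 1
        let a := ext.getD i 0 + (pref.getD (j + 1) 0 - pref.getD (i + 1) 0) - tgetB d (i + 1) j
        let b := ext.getD j 0 + (pref.getD j 0 - pref.getD i 0) - tgetB d i (j - 1)
        tsetB d i j (if a > b then a else b)) d) dpDiag
  let r := (List.range nn).foldl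
      (fun (st : Int × Int) i =>
        let g := (pref.getD (i + half) 0 - pref.getD i 0) +
                 (pref.getD (i + nn) 0 - pref.getD (i + half) 0) -
                 tgetB dpFull (i + half) (i + nn - 1)
        if g > st.1 then (g, (i : Int)) else st)
      (-10^19, -1)
  (r.1, PySem.Int.mod r.2 torta.length)

-- ===== PRECONDITION & SPEC =====
-- Pre_ excludes the empty list (A raises ZeroDivisionError in '-1 % 0') and odd lengths
-- (A raises ValueError); A returns normally exactly on nonempty even-length lists.
def Pre_max_satisfaccion_arreglo (torta : List Int) : Prop :=
  torta ≠ [] ∧ torta.length % 2 = 0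
instance (torta : List Int) : Decidable (Pre_max_satisfaccion_arreglo torta) := by
  unfold Pre_max_satisfaccion_arreglo; infer_instance

def pvWitness_max_satisfaccion_arreglo : List Int := [3, 1, 4, 2]

def Spec_max_satisfaccion_arreglo (torta : List Int) (out : Int × Int) : Prop :=
  out = max_satisfaccion_arreglo_alt torta
instance (torta : List Int) (out : Int × Int) : Decidable (Spec_max_satisfaccion_arreglo torta out) := by
  unfold Spec_max_satisfaccion_arreglo; infer_instance

-- ===== CLAIM (what is proved, stated in full; the proofs are below) =====
def Claim_equal_max_satisfaccion_arreglo : Prop :=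
  ∀ (torta : List Int), Dom_max_satisfaccion_arreglo torta →
    Pre_max_satisfaccion_arreglo torta →
    Spec_max_satisfaccion_arreglo torta (max_satisfaccion_arreglo torta)

-- ===== LEMMAS AND PROOFS =====

-- the common prefix-sum list both programs build
def prefList (l : List Int) : List Int :=
  (List.range (l.length + 1)).map (fun k => (l.take k).sum)

-- the game value on the segment [i, j] of ext: the common mathematical content of both DPs
def dpPure (ext pf : List Int) (i j : Int) : Int :=
  if j ≤ i then ext.getD i.toNat 0
  else
    max (ext.getD i.toNat 0 + ((pf.getD (j + 1).toNat 0 - pf.getD (i + 1).toNat 0) - dpPure ext pf (i + 1) j))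
        (ext.getD j.toNat 0 + ((pf.getD ((j - 1) + 1).toNat 0 - pf.getD i.toNat 0) - dpPure ext pf i (j - 1)))
termination_by (j - i).toNat
decreasing_by all_goals omega

lemma prefA_inv (ext : List Int) :
    ∀ t, t ≤ ext.length →
      (List.range t).foldl
        (fun p k => p.set (k + 1) (p.getD k 0 + ext.getD k 0))
        (List.replicate (ext.length + 1) 0)
      = (List.range (t + 1)).map (fun k => (ext.take k).sum)
          ++ List.replicate (ext.length - t) (0 : Int) := by
  intro t
  induction t with
  | zero => intro _; simp [List.replicate_succ]
  | succ t ih =>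
    intro ht
    rw [List.range_succ, List.foldl_append, ih (by omega)]
    simp only [List.foldl_cons, List.foldl_nil]
    have hget : ((List.range (t + 1)).map (fun k => (ext.take k).sum)
        ++ List.replicate (ext.length - t) (0 : Int)).getD t 0 = (ext.take t).sum := by
      rw [List.getD_append _ _ _ _ (by simp)]
      simp [List.getD_eq_getElem?_getD]
    rw [hget, List.set_append, if_neg (by simp)]
    have hrep : ext.length - t = (ext.length - (t+1)) + 1 := by omega
    rw [hrep, List.replicate_succ]
    have hlen : ((List.range (t + 1)).map (fun k => (ext.take k).sum)).length = t + 1 := by simp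
    rw [hlen, Nat.sub_self, List.set_cons_zero]
    rw [List.range_succ (n := t + 1), List.map_append]
    simp only [List.map_cons, List.map_nil, List.append_assoc, List.cons_append, List.nil_append]
    rw [List.getD_eq_getElem?_getD, List.getElem?_eq_getElem (by omega),
        List.sum_take_succ _ _ (by omega)]
    rfl

lemma prefA_eq (ext : List Int) :
    (List.range ext.length).foldl
      (fun p k => p.set (k + 1) (p.getD k 0 + ext.getD k 0))
      (List.replicate (ext.length + 1) 0) = prefList ext := by
  rw [prefA_inv ext ext.length le_rfl, Nat.sub_self]
  simp [prefList]

lemma prefB_gen :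
    ∀ (l : List Int) (s : Int) (acc : List Int),
      l.foldl (fun (st : Int × List Int) x => (st.1 + x, st.2 ++ [st.1 + x])) (s, acc)
        = (s + l.sum, acc ++ (List.range l.length).map (fun k => s + (l.take (k+1)).sum)) := by
  intro l
  induction l with
  | nil => intro s acc; simp
  | cons x xs ih =>
    intro s acc
    simp only [List.foldl_cons]
    rw [ih]
    simp [List.range_succ_eq_map, List.map_map, Function.comp, List.take_succ_cons, add_assoc]

lemma prefB_eq (ext : List Int) :
    (ext.foldl (fun (st : Int × List Int) x => (st.1 + x, st.2 ++ [st.1 + x])) (0, [0])).2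
      = prefList ext := by
  rw [prefB_gen]
  simp [prefList, List.range_succ_eq_map, List.map_map, Function.comp]

lemma getD_set_cases {α : Type} (l : List α) (p q : Nat) (v : α) (d : α) :
    (l.set p v).getD q d = if p = q ∧ p < l.length then v else l.getD q d := by
  by_cases hpq : p = q
  · subst hpq
    by_cases hlt : p < l.length
    · rw [List.getD_eq_getElem?_getD, List.getElem?_set_self hlt, if_pos ⟨rfl, hlt⟩]
      rfl
    · rw [List.getD_eq_getElem?_getD, List.getElem?_set, if_pos rfl, if_neg hlt,
          if_neg (by tauto), List.getD_eq_getElem?_getD,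
          List.getElem?_eq_none_iff.mpr (by omega)]
  · rw [List.getD_eq_getElem?_getD, List.getElem?_set_ne hpq, if_neg (by tauto),
        List.getD_eq_getElem?_getD]

-- ---------- A side: the memo invariant ----------

def InvA (ext pf : List Int) (memo : List (List Int)) : Prop :=
  ∀ a b : Int, 0 ≤ a → 0 ≤ b →
    mgetA memo a b = -10^19 ∨ mgetA memo a b = dpPure ext pf a b

lemma mget_mset (m : List (List Int)) (i j a b : Int) (v : Int)
    (ha : 0 ≤ a) (hb : 0 ≤ b) (hi : 0 ≤ i) (hj : 0 ≤ j) :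
    mgetA (msetA m i j v) a b = mgetA m a b ∨
      (a = i ∧ b = j ∧ mgetA (msetA m i j v) a b = v) := by
  unfold mgetA msetA
  rw [getD_set_cases]
  split_ifs with h1
  · rw [getD_set_cases]
    have hai : a = i := by omega
    split_ifs with h2
    · right
      exact ⟨hai, by omega, rfl⟩
    · left; rw [hai]
  · left; rfl

lemma InvA_init (ext pf : List Int) (n : Nat) :
    InvA ext pf (List.replicate n (List.replicate n (-10^19 : Int))) := by
  intro a b _ _
  left
  unfold mgetA
  rcases lt_or_ge a.toNat n with h | h
  · rw [List.getD_replicate _ h]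
    rcases lt_or_ge b.toNat n with h2 | h2
    · rw [List.getD_replicate _ h2]
    · rw [List.getD_eq_getElem?_getD, List.getElem?_eq_none_iff.mpr (by simp; omega)]
      rfl
  · rw [List.getD_eq_getElem?_getD (l := List.replicate n (List.replicate n (-10^19 : Int))),
        List.getElem?_eq_none_iff.mpr (by simp; omega)]
    rfl

lemma dpSegA_correct (ext pf : List Int) :
    ∀ (fuel : Nat) (i j : Int) (memo : List (List Int)),
      0 ≤ i → i ≤ j → (j - i).toNat < fuel → InvA ext pf memo →
      (dpSegA fuel i j memo ext pf).1 = dpPure ext pf i j ∧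
        InvA ext pf (dpSegA fuel i j memo ext pf).2 := by
  intro fuel
  induction fuel with
  | zero => intro i j memo _ _ h _; omega
  | succ fuel ih =>
    intro i j memo hi hij hf hinv
    simp only [dpSegA]
    split_ifs with hmem heq
    · rcases hinv i j hi (by omega) with h | h
      · exfalso; rw [h] at hmem; norm_num at hmem
      · exact ⟨h, hinv⟩
    · subst heq
      refine ⟨?_, hinv⟩
      rw [dpPure, if_pos le_rfl]
    · have hlt : i < j := lt_of_le_of_ne hij heq
      obtain ⟨ih1v, ih1inv⟩ := ih (i + 1) j memo (by omega) (by omega) (by omega) hinv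
      obtain ⟨ih2v, ih2inv⟩ := ih i (j - 1) (dpSegA fuel (i + 1) j memo ext pf).2
        hi (by omega) (by omega) ih1inv
      have hval :
          max (ext.getD i.toNat 0 + (sumaSegA pf (i + 1) j - (dpSegA fuel (i + 1) j memo ext pf).1))
              (ext.getD j.toNat 0 + (sumaSegA pf i (j - 1) -
                (dpSegA fuel i (j - 1) (dpSegA fuel (i + 1) j memo ext pf).2 ext pf).1))
            = dpPure ext pf i j := by
        simp only [sumaSegA, if_neg (by omega : ¬ i + 1 > j), if_neg (by omega : ¬ i > j - 1)]
        rw [ih1v, ih2v]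
        conv_rhs => rw [dpPure]
        rw [if_neg (by omega : ¬ j ≤ i)]
      refine ⟨hval, ?_⟩
      intro a b ha hb
      rcases mget_mset (dpSegA fuel i (j - 1) (dpSegA fuel (i + 1) j memo ext pf).2 ext pf).2
          i j a b _ ha hb hi (by omega) with h | ⟨hai, hbj, hv⟩
      · rw [h]; exact ih2inv a b ha hb
      · right; rw [hv, hai, hbj, hval]

lemma loopA_fold (ext pf : List Int) (total mitad : Int) (fuel : Nat)
    (hm : 1 ≤ mitad) (hmt : mitad ≤ total - 1) (hfuel : (total - mitad - 1).toNat < fuel) :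
    ∀ (l : List Int) (may mej : Int) (memo : List (List Int)),
      (∀ x ∈ l, 0 ≤ x) → InvA ext pf memo →
      ((l.foldl (fun (st : Int × Int × List (List Int)) i =>
          if sumaSegA pf i (i + mitad - 1) + (sumaSegA pf (i + mitad) (i + total - 1)
               - (dpSegA fuel (i + mitad) (i + total - 1) st.2.2 ext pf).1) > st.1
          then (sumaSegA pf i (i + mitad - 1) + (sumaSegA pf (i + mitad) (i + total - 1)
                 - (dpSegA fuel (i + mitad) (i + total - 1) st.2.2 ext pf).1), i,
                (dpSegA fuel (i + mitad) (i + total - 1) st.2.2 ext pf).2)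
          else (st.1, st.2.1, (dpSegA fuel (i + mitad) (i + total - 1) st.2.2 ext pf).2))
          (may, mej, memo)).1,
       (l.foldl (fun (st : Int × Int × List (List Int)) i =>
          if sumaSegA pf i (i + mitad - 1) + (sumaSegA pf (i + mitad) (i + total - 1)
               - (dpSegA fuel (i + mitad) (i + total - 1) st.2.2 ext pf).1) > st.1
          then (sumaSegA pf i (i + mitad - 1) + (sumaSegA pf (i + mitad) (i + total - 1)
                 - (dpSegA fuel (i + mitad) (i + total - 1) st.2.2 ext pf).1), i,
                (dpSegA fuel (i + mitad) (i + total - 1) st.2.2 ext pf).2)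
          else (st.1, st.2.1, (dpSegA fuel (i + mitad) (i + total - 1) st.2.2 ext pf).2))
          (may, mej, memo)).2.1)
      = l.foldl (fun (st : Int × Int) i =>
          if sumaSegA pf i (i + mitad - 1) + (sumaSegA pf (i + mitad) (i + total - 1)
               - dpPure ext pf (i + mitad) (i + total - 1)) > st.1
          then (sumaSegA pf i (i + mitad - 1) + (sumaSegA pf (i + mitad) (i + total - 1)
                 - dpPure ext pf (i + mitad) (i + total - 1)), i)
          else st) (may, mej) := by
  intro l
  induction l with
  | nil => intro may mej memo _ _; rfl
  | cons x xs ih =>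
    intro may mej memo hpos hinv
    have hx : 0 ≤ x := hpos x (by simp)
    obtain ⟨hv, hinv2⟩ := dpSegA_correct ext pf fuel (x + mitad) (x + total - 1) memo
      (by omega) (by omega) (by omega) hinv
    simp only [List.foldl_cons]
    rw [hv]
    by_cases hg : sumaSegA pf x (x + mitad - 1) +
        (sumaSegA pf (x + mitad) (x + total - 1) - dpPure ext pf (x + mitad) (x + total - 1)) > may
    · simp only [if_pos hg]
      exact ih _ _ _ (fun y hy => hpos y (by simp [hy])) hinv2
    · simp only [if_neg hg]
      exact ih _ _ _ (fun y hy => hpos y (by simp [hy])) hinv2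

-- ---------- B side: the table invariant ----------

lemma dpPure_nat_base (ext pf : List Int) (i : Nat) :
    dpPure ext pf (i : Int) (i : Int) = ext.getD i 0 := by
  rw [dpPure, if_pos le_rfl]
  simp

lemma dpPure_nat_step (ext pf : List Int) (i j : Nat) (h : i < j) :
    dpPure ext pf (i : Int) (j : Int)
      = max (ext.getD i 0 + ((pf.getD (j + 1) 0 - pf.getD (i + 1) 0) - dpPure ext pf ((i + 1 : Nat) : Int) (j : Int)))
            (ext.getD j 0 + ((pf.getD j 0 - pf.getD i 0) - dpPure ext pf (i : Int) ((j - 1 : Nat) : Int))) := by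
  rw [dpPure, if_neg (by exact_mod_cast Nat.not_le.mpr h)]
  have e1 : ((j : Int) + 1).toNat = j + 1 := by omega
  have e2 : ((i : Int) + 1).toNat = i + 1 := by omega
  have e3 : ((j : Int) - 1 + 1).toNat = j := by omega
  have e4 : ((i : Int)).toNat = i := by omega
  have e5 : ((j : Int)).toNat = j := by omega
  have e6 : (i : Int) + 1 = ((i + 1 : Nat) : Int) := by omega
  have e7 : (j : Int) - 1 = ((j - 1 : Nat) : Int) := by omega
  rw [e1, e2, e3, e4, e5, e6, e7]

def LenB (m : Nat) (d : List (List Int)) : Prop :=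
  d.length = m ∧ ∀ r ∈ d, r.length = m

lemma tget_tset_ne (d : List (List Int)) (i j a b : Nat) (v : Int)
    (h : ¬(a = i ∧ b = j)) : tgetB (tsetB d i j v) a b = tgetB d a b := by
  unfold tgetB tsetB
  rw [getD_set_cases]
  split_ifs with h1
  · rw [getD_set_cases]
    rw [if_neg (by tauto), h1.1]
  · rfl

lemma tget_tset_self (d : List (List Int)) (m : Nat) (i j : Nat) (v : Int)
    (hL : LenB m d) (hi : i < m) (hj : j < m) :
    tgetB (tsetB d i j v) i j = v := by
  unfold tgetB tsetB
  have hdl : d.length = m := hL.1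
  have hrow : (d.getD i []).length = m := by
    rw [List.getD_eq_getElem?_getD, List.getElem?_eq_getElem (by omega : i < d.length)]
    exact hL.2 _ (List.getElem_mem _)
  rw [getD_set_cases, if_pos ⟨rfl, by omega⟩, getD_set_cases, if_pos ⟨rfl, by omega⟩]

lemma LenB_tset (m : Nat) (d : List (List Int)) (i j : Nat) (v : Int)
    (hL : LenB m d) (hi : i < m) :
    LenB m (tsetB d i j v) := by
  have hdl : d.length = m := hL.1
  have hrow : (d.getD i []).length = m := by
    rw [List.getD_eq_getElem?_getD, List.getElem?_eq_getElem (by omega : i < d.length)]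
    exact hL.2 _ (List.getElem_mem _)
  refine ⟨by simp [tsetB, hL.1], ?_⟩
  intro r hr
  rcases List.mem_or_eq_of_mem_set hr with h | h
  · exact hL.2 r h
  · rw [h, List.length_set, hrow]

lemma LenB_replicate (m : Nat) : LenB m (List.replicate m (List.replicate m (0 : Int))) := by
  refine ⟨by simp, ?_⟩
  intro r hr
  rw [List.eq_of_mem_replicate hr]
  simp

def SmallB (ext pf : List Int) (m ℓ : Nat) (d : List (List Int)) : Prop :=
  ∀ i j : Nat, i ≤ j → j < m → j - i + 1 < ℓ → tgetB d i j = dpPure ext pf (i : Int) (j : Int)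

lemma diag_fold (ext : List Int) (m : Nat) :
    ∀ (is : List Nat) (d : List (List Int)), (∀ x ∈ is, x < m) → LenB m d →
      LenB m (is.foldl (fun d i => tsetB d i i (ext.getD i 0)) d) ∧
      (∀ i, i < m → (tgetB d i i = ext.getD i 0 ∨ i ∈ is) →
        tgetB (is.foldl (fun d i => tsetB d i i (ext.getD i 0)) d) i i = ext.getD i 0) := by
  intro is
  induction is with
  | nil =>
    intro d _ hL
    refine ⟨hL, ?_⟩
    intro i him h
    rcases h with h | h
    · exact h
    · simp at h
  | cons x xs ih =>
    intro d hmem hL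
    simp only [List.foldl_cons]
    have hx : x < m := hmem x (by simp)
    have hL2 := LenB_tset m d x x (ext.getD x 0) hL (by omega)
    obtain ⟨ihL, ihv⟩ := ih (tsetB d x x (ext.getD x 0)) (fun y hy => hmem y (by simp [hy])) hL2
    refine ⟨ihL, ?_⟩
    intro i him h
    apply ihv i him
    by_cases hix : i = x
    · left; subst hix; exact tget_tset_self d m i i _ hL (by omega) (by omega)
    · rcases h with h | h
      · left; rw [tget_tset_ne _ _ _ _ _ _ (by tauto)]; exact h
      · rcases List.mem_cons.mp h with h2 | h2
        · exact absurd h2 hix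
        · right; exact h2

lemma inner_fold (ext pf : List Int) (m ℓ : Nat) (hℓ : 2 ≤ ℓ) (hm : ℓ ≤ m) :
    ∀ (is : List Nat) (d : List (List Int)), (∀ x ∈ is, x + ℓ ≤ m) → LenB m d →
      SmallB ext pf m ℓ d →
      (LenB m (is.foldl (fun d i =>
          tsetB d i (i + ℓ - 1)
            (if ext.getD i 0 + (pf.getD (i + ℓ - 1 + 1) 0 - pf.getD (i + 1) 0) - tgetB d (i + 1) (i + ℓ - 1)
                > ext.getD (i + ℓ - 1) 0 + (pf.getD (i + ℓ - 1) 0 - pf.getD i 0) - tgetB d i (i + ℓ - 1 - 1)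
             then ext.getD i 0 + (pf.getD (i + ℓ - 1 + 1) 0 - pf.getD (i + 1) 0) - tgetB d (i + 1) (i + ℓ - 1)
             else ext.getD (i + ℓ - 1) 0 + (pf.getD (i + ℓ - 1) 0 - pf.getD i 0) - tgetB d i (i + ℓ - 1 - 1))) d)) ∧
      SmallB ext pf m ℓ (is.foldl (fun d i =>
          tsetB d i (i + ℓ - 1)
            (if ext.getD i 0 + (pf.getD (i + ℓ - 1 + 1) 0 - pf.getD (i + 1) 0) - tgetB d (i + 1) (i + ℓ - 1)
                > ext.getD (i + ℓ - 1) 0 + (pf.getD (i + ℓ - 1) 0 - pf.getD i 0) - tgetB d i (i + ℓ - 1 - 1)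
             then ext.getD i 0 + (pf.getD (i + ℓ - 1 + 1) 0 - pf.getD (i + 1) 0) - tgetB d (i + 1) (i + ℓ - 1)
             else ext.getD (i + ℓ - 1) 0 + (pf.getD (i + ℓ - 1) 0 - pf.getD i 0) - tgetB d i (i + ℓ - 1 - 1))) d) ∧
      (∀ i j : Nat, i ≤ j → j < m → j - i + 1 = ℓ →
        (tgetB d i j = dpPure ext pf (i : Int) (j : Int) ∨ i ∈ is) →
        tgetB (is.foldl (fun d i =>
          tsetB d i (i + ℓ - 1)
            (if ext.getD i 0 + (pf.getD (i + ℓ - 1 + 1) 0 - pf.getD (i + 1) 0) - tgetB d (i + 1) (i + ℓ - 1)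
                > ext.getD (i + ℓ - 1) 0 + (pf.getD (i + ℓ - 1) 0 - pf.getD i 0) - tgetB d i (i + ℓ - 1 - 1)
             then ext.getD i 0 + (pf.getD (i + ℓ - 1 + 1) 0 - pf.getD (i + 1) 0) - tgetB d (i + 1) (i + ℓ - 1)
             else ext.getD (i + ℓ - 1) 0 + (pf.getD (i + ℓ - 1) 0 - pf.getD i 0) - tgetB d i (i + ℓ - 1 - 1))) d) i j
          = dpPure ext pf (i : Int) (j : Int)) := by
  intro is
  induction is with
  | nil =>
    intro d _ hL hS
    refine ⟨hL, hS, ?_⟩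
    intro i j hij hjm hlen h
    rcases h with h | h
    · exact h
    · simp at h
  | cons x xs ih =>
    intro d hmem hL hS
    simp only [List.foldl_cons]
    have hx : x + ℓ ≤ m := hmem x (by simp)
    set jx := x + ℓ - 1 with hjx
    have hread1 : tgetB d (x + 1) jx = dpPure ext pf ((x + 1 : Nat) : Int) ((jx : Nat) : Int) :=
      hS (x + 1) jx (by omega) (by omega) (by omega)
    have hread2 : tgetB d x (jx - 1) = dpPure ext pf ((x : Nat) : Int) ((jx - 1 : Nat) : Int) :=
      hS x (jx - 1) (by omega) (by omega) (by omega)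
    have hstep := dpPure_nat_step ext pf x jx (by omega)
    have hval :
        (if ext.getD x 0 + (pf.getD (x + ℓ - 1 + 1) 0 - pf.getD (x + 1) 0) - tgetB d (x + 1) (x + ℓ - 1)
            > ext.getD (x + ℓ - 1) 0 + (pf.getD (x + ℓ - 1) 0 - pf.getD x 0) - tgetB d x (x + ℓ - 1 - 1)
         then ext.getD x 0 + (pf.getD (x + ℓ - 1 + 1) 0 - pf.getD (x + 1) 0) - tgetB d (x + 1) (x + ℓ - 1)
         else ext.getD (x + ℓ - 1) 0 + (pf.getD (x + ℓ - 1) 0 - pf.getD x 0) - tgetB d x (x + ℓ - 1 - 1))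
          = dpPure ext pf (x : Int) (jx : Int) := by
      rw [← hjx, hread1, hread2, hstep]
      have hjx1 : jx + 1 = x + ℓ := by omega
      rw [hjx1]
      omega
    have hfold :
        (tsetB d x (x + ℓ - 1)
          (if ext.getD x 0 + (pf.getD (x + ℓ - 1 + 1) 0 - pf.getD (x + 1) 0) - tgetB d (x + 1) (x + ℓ - 1)
              > ext.getD (x + ℓ - 1) 0 + (pf.getD (x + ℓ - 1) 0 - pf.getD x 0) - tgetB d x (x + ℓ - 1 - 1)
           then ext.getD x 0 + (pf.getD (x + ℓ - 1 + 1) 0 - pf.getD (x + 1) 0) - tgetB d (x + 1) (x + ℓ - 1)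
           else ext.getD (x + ℓ - 1) 0 + (pf.getD (x + ℓ - 1) 0 - pf.getD x 0) - tgetB d x (x + ℓ - 1 - 1)))
          = tsetB d x jx (dpPure ext pf (x : Int) (jx : Int)) := by
      rw [hval, ← hjx]
    rw [hfold]
    have hL2 : LenB m (tsetB d x jx (dpPure ext pf (x : Int) (jx : Int))) :=
      LenB_tset m d x jx _ hL (by omega)
    have hS2 : SmallB ext pf m ℓ (tsetB d x jx (dpPure ext pf (x : Int) (jx : Int))) := by
      intro i j hij hjm hlen
      rw [tget_tset_ne _ _ _ _ _ _ (by omega)]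
      exact hS i j hij hjm hlen
    obtain ⟨ihL, ihS, ihv⟩ := ih (tsetB d x jx (dpPure ext pf (x : Int) (jx : Int)))
      (fun y hy => hmem y (by simp [hy])) hL2 hS2
    refine ⟨ihL, ihS, ?_⟩
    intro i j hij hjm hlen h
    apply ihv i j hij hjm hlen
    by_cases hix : i = x
    · left
      subst hix
      have hjj : j = jx := by omega
      subst hjj
      exact tget_tset_self d m i jx _ hL (by omega) (by omega)
    · rcases h with h | h
      · left; rw [tget_tset_ne _ _ _ _ _ _ (by tauto)]; exact h
      · rcases List.mem_cons.mp h with h2 | h2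
        · exact absurd h2 hix
        · right; exact h2

lemma outer_fold (ext pf : List Int) (m : Nat) :
    ∀ (k start : Nat) (d : List (List Int)), 2 ≤ start → start + k ≤ m + 1 →
      LenB m d → SmallB ext pf m start d →
      SmallB ext pf m (start + k) ((List.range' start k).foldl (fun d largo =>
        (List.range (m - largo + 1)).foldl (fun d i =>
          tsetB d i (i + largo - 1)
            (if ext.getD i 0 + (pf.getD (i + largo - 1 + 1) 0 - pf.getD (i + 1) 0) - tgetB d (i + 1) (i + largo - 1)
                > ext.getD (i + largo - 1) 0 + (pf.getD (i + largo - 1) 0 - pf.getD i 0) - tgetB d i (i + largo - 1 - 1)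
             then ext.getD i 0 + (pf.getD (i + largo - 1 + 1) 0 - pf.getD (i + 1) 0) - tgetB d (i + 1) (i + largo - 1)
             else ext.getD (i + largo - 1) 0 + (pf.getD (i + largo - 1) 0 - pf.getD i 0) - tgetB d i (i + largo - 1 - 1))) d) d) := by
  intro k
  induction k with
  | zero =>
    intro start d _ _ _ hS
    simpa using hS
  | succ k ihk =>
    intro start d hs2 hsk hL hS
    rw [List.range'_succ, List.foldl_cons]
    obtain ⟨hL2, hS2, hnew⟩ := inner_fold ext pf m start hs2 (by omega)
      (List.range (m - start + 1)) d
      (fun x hx => by simp at hx; omega) hL hS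
    have hSnext : SmallB ext pf m (start + 1)
        ((List.range (m - start + 1)).foldl (fun d i =>
          tsetB d i (i + start - 1)
            (if ext.getD i 0 + (pf.getD (i + start - 1 + 1) 0 - pf.getD (i + 1) 0) - tgetB d (i + 1) (i + start - 1)
                > ext.getD (i + start - 1) 0 + (pf.getD (i + start - 1) 0 - pf.getD i 0) - tgetB d i (i + start - 1 - 1)
             then ext.getD i 0 + (pf.getD (i + start - 1 + 1) 0 - pf.getD (i + 1) 0) - tgetB d (i + 1) (i + start - 1)
             else ext.getD (i + start - 1) 0 + (pf.getD (i + start - 1) 0 - pf.getD i 0) - tgetB d i (i + start - 1 - 1))) d) := by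
      intro i j hij hjm hlen
      rcases Nat.lt_or_ge (j - i + 1) start with hc | hc
      · exact hS2 i j hij hjm hc
      · exact hnew i j hij hjm (by omega) (Or.inr (by simp; omega))
    have hrec := ihk (start + 1) _ (by omega) (by omega) hL2 hSnext
    have harr : start + 1 + k = start + (k + 1) := by omega
    rwa [harr] at hrec

lemma final_pair_eq {A B : Int × Int} (n : Int) (h : A = B) :
    (A.1, PySem.Int.mod A.2 n) = (B.1, PySem.Int.mod B.2 n) := by rw [h]

-- ===== VERDICT (by name: the statement is the Claim_ definition above) =====
theorem max_satisfaccion_arreglo_spec : Claim_equal_max_satisfaccion_arreglo := by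
  unfold Claim_equal_max_satisfaccion_arreglo
  intro torta _ hpre
  unfold Spec_max_satisfaccion_arreglo
  obtain ⟨hne, heven⟩ := hpre
  have h0 : torta.length ≠ 0 := fun h => hne (List.eq_nil_of_length_eq_zero h)
  have hnn2 : 2 ≤ torta.length := by omega
  have hmitad : PySem.Int.floordiv (torta.length : Int) 2 = ((torta.length / 2 : Nat) : Int) := by
    exact_mod_cast PySem.Int.floordiv_natCast torta.length 2
  have hrange : PySem.List.pyRange 0 (torta.length : Int) 1
      = (List.range torta.length).map (fun k => ((k : Nat) : Int)) := by
    rw [PySem.List.pyRange_one]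
    simp
  unfold max_satisfaccion_arreglo max_satisfaccion_arreglo_alt
  simp only [prefA_eq, prefB_eq]
  simp only [hmitad, hrange, List.foldl_map]
  -- A's threaded loop computes the pure minimax values
  have hloop := loopA_fold (torta ++ torta) (prefList (torta ++ torta))
      (torta.length : Int) ((torta.length / 2 : Nat) : Int) (2 * torta.length + 1)
      (by have : 1 ≤ torta.length / 2 := by omega
          exact_mod_cast this)
      (by omega) (by omega)
      ((List.range torta.length).map (fun k => ((k : Nat) : Int))) (-10^19) (-1)
      (List.replicate (2 * torta.length) (List.replicate (2 * torta.length) (-10^19 : Int)))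
      (by intro x hx; simp at hx; omega)
      (InvA_init _ _ _)
  simp only [List.foldl_map] at hloop
  rw [Prod.ext_iff] at hloop
  obtain ⟨h1, h2⟩ := hloop
  dsimp only at h1 h2
  rw [h1, h2]
  apply final_pair_eq
  -- B's table holds the same pure minimax values
  obtain ⟨hLd, hvd⟩ := diag_fold (torta ++ torta) (2 * torta.length)
    (List.range (2 * torta.length))
    (List.replicate (2 * torta.length) (List.replicate (2 * torta.length) 0))
    (by intro x hx; simpa using hx) (LenB_replicate _)
  have hSd : SmallB (torta ++ torta) (prefList (torta ++ torta)) (2 * torta.length) 2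
      (List.foldl (fun d i => tsetB d i i ((torta ++ torta).getD i 0))
        (List.replicate (2 * torta.length) (List.replicate (2 * torta.length) 0))
        (List.range (2 * torta.length))) := by
    intro i j hij hjm hlen
    have hji : j = i := by omega
    subst hji
    rw [dpPure_nat_base]
    exact hvd j hjm (Or.inr (List.mem_range.mpr hjm))
  have houter := outer_fold (torta ++ torta) (prefList (torta ++ torta)) (2 * torta.length)
    (2 * torta.length - 1) 2 _ (le_refl 2) (by omega) hLd hSd
  -- compare the two memo-free loops element by element
  apply PySem.List.foldl_congr_mem'
  intro k hk st
  have hkn : k < torta.length := List.mem_range.mp hk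
  have htab := houter (k + torta.length / 2) (k + torta.length - 1)
    (by omega) (by omega) (by omega)
  have c1 : ¬ ((k : Int) > (k : Int) + ((torta.length / 2 : Nat) : Int) - 1) := by omega
  have c2 : ¬ ((k : Int) + ((torta.length / 2 : Nat) : Int) > (k : Int) + (torta.length : Int) - 1) := by omega
  have hg : sumaSegA (prefList (torta ++ torta)) (k : Int) ((k : Int) + ((torta.length / 2 : Nat) : Int) - 1) +
        (sumaSegA (prefList (torta ++ torta)) ((k : Int) + ((torta.length / 2 : Nat) : Int))
            ((k : Int) + (torta.length : Int) - 1) -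
          dpPure (torta ++ torta) (prefList (torta ++ torta))
            ((k : Int) + ((torta.length / 2 : Nat) : Int)) ((k : Int) + (torta.length : Int) - 1))
      = (prefList (torta ++ torta)).getD (k + torta.length / 2) 0 -
          (prefList (torta ++ torta)).getD k 0 +
          ((prefList (torta ++ torta)).getD (k + torta.length) 0 -
            (prefList (torta ++ torta)).getD (k + torta.length / 2) 0) -
          tgetB (List.foldl (fun d largo =>
              List.foldl (fun d i =>
                tsetB d i (i + largo - 1)
                  (if (torta ++ torta).getD i 0 +
                        ((prefList (torta ++ torta)).getD (i + largo - 1 + 1) 0 -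
                          (prefList (torta ++ torta)).getD (i + 1) 0) -
                        tgetB d (i + 1) (i + largo - 1) >
                      (torta ++ torta).getD (i + largo - 1) 0 +
                        ((prefList (torta ++ torta)).getD (i + largo - 1) 0 -
                          (prefList (torta ++ torta)).getD i 0) -
                        tgetB d i (i + largo - 1 - 1)
                   then (torta ++ torta).getD i 0 +
                        ((prefList (torta ++ torta)).getD (i + largo - 1 + 1) 0 -
                          (prefList (torta ++ torta)).getD (i + 1) 0) -
                        tgetB d (i + 1) (i + largo - 1)
                   else (torta ++ torta).getD (i + largo - 1) 0 +
                        ((prefList (torta ++ torta)).getD (i + largo - 1) 0 -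
                          (prefList (torta ++ torta)).getD i 0) -
                        tgetB d i (i + largo - 1 - 1)))
                d (List.range (2 * torta.length - largo + 1)))
              (List.foldl (fun d i => tsetB d i i ((torta ++ torta).getD i 0))
                (List.replicate (2 * torta.length) (List.replicate (2 * torta.length) 0))
                (List.range (2 * torta.length)))
              (List.range' 2 (2 * torta.length - 1)))
            (k + torta.length / 2) (k + torta.length - 1) := by
    rw [htab]
    rw [sumaSegA, if_neg c1, sumaSegA, if_neg c2]
    have e1 : ((k : Int) + ((torta.length / 2 : Nat) : Int) - 1 + 1).toNat = k + torta.length / 2 := by omega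
    have e2 : ((k : Int)).toNat = k := by omega
    have e3 : ((k : Int) + (torta.length : Int) - 1 + 1).toNat = k + torta.length := by omega
    have e4 : ((k : Int) + ((torta.length / 2 : Nat) : Int)).toNat = k + torta.length / 2 := by omega
    have e5 : (k : Int) + ((torta.length / 2 : Nat) : Int) = ((k + torta.length / 2 : Nat) : Int) := by omega
    have e6 : (k : Int) + (torta.length : Int) - 1 = ((k + torta.length - 1 : Nat) : Int) := by omega
    rw [e1, e2, e3, e4, e5, e6]
    ring
  rw [hg]
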